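-- pv_equiv track=rewrite | github.com/zenzenzencoding/basic_python | final_test/ResultB/10141530410/10141530410-姚守权-编程.py | drawPoint
-- ===== SOURCE A (Python) =====
-- def drawPoint(start,end):
--     s=''
--     for i in range(0,5):
--         if i==start:
--             s+='*'
--         elif i==end:
--             s+='*'
--         else:
--             s+=' '
--     return s
-- ===== SOURCE B (Python) =====
-- def drawPoint(start, end):
--     lst = [' '] * 5
--     if 0 <= start < 5:
--         lst[start] = '*'
--     if 0 <= end < 5:
--         lst[end] = '*'
--     return ''.join(lst)
-- ===== Notes on version B (the rewrite author's own statement) =====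
-- stated objective: simpler
-- what changed: Replaces A's scan of all five positions with equality tests at each slot by direct indexed assignment of '*' into a five-space buffer (guarded for range), then joins.
import Mathlib
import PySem

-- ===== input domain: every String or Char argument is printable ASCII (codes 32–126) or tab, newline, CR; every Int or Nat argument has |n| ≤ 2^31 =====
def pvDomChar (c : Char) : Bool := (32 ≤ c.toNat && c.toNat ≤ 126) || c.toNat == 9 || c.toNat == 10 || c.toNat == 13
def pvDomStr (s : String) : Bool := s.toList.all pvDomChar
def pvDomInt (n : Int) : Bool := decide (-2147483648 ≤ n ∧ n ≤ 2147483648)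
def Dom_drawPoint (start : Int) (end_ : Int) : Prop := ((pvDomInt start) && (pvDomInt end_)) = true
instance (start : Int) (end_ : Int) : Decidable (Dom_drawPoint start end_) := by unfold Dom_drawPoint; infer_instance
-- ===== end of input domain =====

-- B replaces A's per-slot comparison scan with two guarded direct writes into a five-space buffer (objective: simpler).

-- ===== PORT A =====
-- A builds the string by scanning i = 0..4 and comparing each slot to start/end.
-- (string accumulation is ported on List Char, joined at the end with String.ofList — exact for these ASCII chars)
def drawPoint (start : Int) (end_ : Int) : String :=
  String.ofList ((PySem.List.pyRange 0 5 1).foldl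
    (fun s i =>
      if i == start then s ++ ['*']
      else if i == end_ then s ++ ['*']
      else s ++ [' ']) ([] : List Char))

-- ===== PORT B =====
-- B: buffer of five spaces, direct indexed assignment of '*' when in range, then join.
def drawPoint_alt (start : Int) (end_ : Int) : String :=
  let lst : List Char := [' ', ' ', ' ', ' ', ' ']
  let lst := if 0 ≤ start ∧ start < 5 then lst.set start.toNat '*' else lst
  let lst := if 0 ≤ end_ ∧ end_ < 5 then lst.set end_.toNat '*' else lst
  String.ofList lst

-- ===== PRECONDITION & SPEC =====
def Spec_drawPoint (start : Int) (end_ : Int) (out : String) : Prop := out = drawPoint_alt start end_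
instance (start : Int) (end_ : Int) (out : String) : Decidable (Spec_drawPoint start end_ out) := by unfold Spec_drawPoint; infer_instance

-- ===== CLAIM (what is proved, stated in full; the proofs are below) =====
def Claim_equal_drawPoint : Prop := ∀ (start : Int) (end_ : Int), Dom_drawPoint start end_ → Spec_drawPoint start end_ (drawPoint start end_)

-- ===== LEMMAS AND PROOFS =====

-- ===== VERDICT (by name: the statement is the Claim_ definition above) =====
set_option maxHeartbeats 4000000 in
theorem drawPoint_spec : Claim_equal_drawPoint := by
  intro start end_ _
  unfold Spec_drawPoint drawPoint drawPoint_alt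
  rw [show PySem.List.pyRange 0 5 1 = [0, 1, 2, 3, 4] by
        rw [PySem.List.pyRange_one_cons (by norm_num), PySem.List.pyRange_one_cons (by norm_num),
            PySem.List.pyRange_one_cons (by norm_num), PySem.List.pyRange_one_cons (by norm_num),
            PySem.List.pyRange_one_cons (by norm_num), PySem.List.pyRange_one_eq_nil (by norm_num)]
        norm_num]
  simp only [List.foldl_cons, List.foldl_nil]
  apply congrArg
  have hs : start < 0 ∨ start = 0 ∨ start = 1 ∨ start = 2 ∨ start = 3 ∨ start = 4 ∨ 5 ≤ start := by omega
  have he : end_ < 0 ∨ end_ = 0 ∨ end_ = 1 ∨ end_ = 2 ∨ end_ = 3 ∨ end_ = 4 ∨ 5 ≤ end_ := by omega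
  rcases hs with hs | hs | hs | hs | hs | hs | hs <;>
    rcases he with he | he | he | he | he | he | he <;>
    subst_eqs <;>
    simp only [beq_iff_eq] <;>
    (try rw [if_neg (show ¬(0:Int) = start from by omega), if_neg (show ¬(0:Int) = end_ from by omega),
             if_neg (show ¬(1:Int) = start from by omega), if_neg (show ¬(1:Int) = end_ from by omega),
             if_neg (show ¬(2:Int) = start from by omega), if_neg (show ¬(2:Int) = end_ from by omega),
             if_neg (show ¬(3:Int) = start from by omega), if_neg (show ¬(3:Int) = end_ from by omega),
             if_neg (show ¬(4:Int) = start from by omega), if_neg (show ¬(4:Int) = end_ from by omega),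
             if_neg (show ¬((0:Int) ≤ start ∧ start < 5) from by omega),
             if_neg (show ¬((0:Int) ≤ end_ ∧ end_ < 5) from by omega)]) <;>
    (try norm_num) <;>
    (try split_ifs) <;>
    first | rfl | decide | omega
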